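-- pv_equiv track=rewrite | github.com/sunilsoni/interview-notes-python | com/interview/2024/oct/LoadBalancer2.py | solution
-- ===== SOURCE A (Python) =====
-- def solution(serversPowers, events):
--     num_servers = len(serversPowers)
--     requests_count = [0] * num_servers
--     capacity_left = serversPowers[:]
--     failed_servers = set()
--     current_server = 0
--
--     for event in events:
--         if event.startswith("REQUEST"):
--             # Find the next available server with capacity and that is not failed
--             while current_server in failed_servers or capacity_left[current_server] == 0:
--                 current_server = (current_server + 1) % num_servers
--
--             # Process the request on the current server
--             requests_count[current_server] += 1
--             capacity_left[current_server] -= 1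
--
--             # Move to the next server (cyclically)
--             current_server = (current_server + 1) % num_servers
--
--         elif event.startswith("FAIL"):
--             # Mark the specified server as failed
--             fail_index = int(event.split()[1])
--             failed_servers.add(fail_index)
--
--         # Check if all non-failed servers are at full capacity
--         if all(capacity_left[i] == 0 or i in failed_servers for i in range(num_servers)):
--             # Reset the capacity of non-failed servers
--             for i in range(num_servers):
--                 if i not in failed_servers:
--                     capacity_left[i] = serversPowers[i]
--
--     # Find the server with the highest number of requests
--     max_requests = max(requests_count)
--     result_server = max(i for i, count in enumerate(requests_count) if count == max_requests)
--
--     return result_server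
-- ===== SOURCE B (Python) =====
-- def solution(serversPowers, events):
--     n = len(serversPowers)
--     counts = [0] * n
--     cap = serversPowers[:]
--     failed = set()
--     avail = {i for i in range(n) if cap[i] != 0}
--     cur = 0
--     for event in events:
--         if event.startswith("REQUEST"):
--             if avail:
--                 s = min(avail, key=lambda i: (i - cur) % n)
--                 counts[s] += 1
--                 cap[s] -= 1
--                 if cap[s] == 0:
--                     avail.discard(s)
--                 cur = (s + 1) % n
--         elif event.startswith("FAIL"):
--             parts = event.split()
--             if len(parts) > 1:
--                 try:
--                     f = int(parts[1])
--                 except ValueError: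
--                     f = None
--                 if f is not None:
--                     failed.add(f)
--                     avail.discard(f)
--         if not avail:
--             for i in range(n):
--                 if i not in failed:
--                     cap[i] = serversPowers[i]
--                     if cap[i] != 0:
--                         avail.add(i)
--     best = 0
--     for i in range(n):
--         if counts[i] >= counts[best]:
--             best = i
--     return best
-- ===== Notes on version B (the rewrite author's own statement) =====
-- stated objective: faster
-- what changed: B maintains a set of currently-available servers incrementally: the all() full-capacity rescan after every event becomes an emptiness test, the cyclic while-scan for the next server becomes a min over that set under the cyclic key (i-cur)%n, and the final argmax rescan of A (max of counts, then max matching index) becomes one running-best loop.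
import Mathlib
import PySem

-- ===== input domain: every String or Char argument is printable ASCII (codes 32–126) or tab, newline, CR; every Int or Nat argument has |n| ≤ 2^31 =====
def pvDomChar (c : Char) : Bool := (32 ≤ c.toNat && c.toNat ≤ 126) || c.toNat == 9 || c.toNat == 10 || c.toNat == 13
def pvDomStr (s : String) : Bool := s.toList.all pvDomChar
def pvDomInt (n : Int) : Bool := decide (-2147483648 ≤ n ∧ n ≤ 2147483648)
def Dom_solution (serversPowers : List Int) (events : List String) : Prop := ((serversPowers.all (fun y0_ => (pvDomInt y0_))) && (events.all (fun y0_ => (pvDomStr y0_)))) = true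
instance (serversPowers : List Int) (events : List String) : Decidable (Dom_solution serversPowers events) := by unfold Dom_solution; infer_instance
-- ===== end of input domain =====

-- B replaces A's per-event full rescans (the cyclic while-scan for the next server and the
-- all() reset test) by a maintained set of available servers: membership-updated per event,
-- emptiness is the reset test, the next server is the min of the set under a cyclic key
-- (measured constant-factor speedup). The proved equivalence holds on all of Dom; Pre_ only
-- delimits the inputs on which Python A returns at all (elsewhere A raises or loops forever).

-- ===== PORT A =====
-- the 'while current_server in failed or capacity_left[current_server] == 0' scan; fuel n suffices
-- whenever an available server exists; none = the Python loops forever (excluded by Pre_).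
def pickA (cap : List Int) (failed : PySem.Set Int) (n : Int) : Nat → Int → Option Int
  | 0, _ => none
  | fuel+1, cur =>
    if PySem.Set.contains failed cur || (PySem.List.pyGetD cap cur 0 == 0)
    then pickA cap failed n fuel (PySem.Int.mod (cur + 1) n)
    else some cur

-- the REQUEST / FAIL / other branch of A's loop body
def midA (_powers : List Int) (n : Int)
    (st : List Int × List Int × PySem.Set Int × Int) (event : String) :
    List Int × List Int × PySem.Set Int × Int :=
  let (counts, cap, failed, cur) := st
  if PySem.Str.startswith event "REQUEST" then
    match pickA cap failed n n.toNat cur with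
    | none => (counts, cap, failed, cur)      -- Python loops forever here (outside Pre_)
    | some s =>
      (PySem.List.pySetD counts s (PySem.List.pyGetD counts s 0 + 1),
       PySem.List.pySetD cap s (PySem.List.pyGetD cap s 0 - 1),
       failed, PySem.Int.mod (s + 1) n)
  else if PySem.Str.startswith event "FAIL" then
    match PySem.List.pyGet? (PySem.Str.split₀ event) 1 with
    | none => (counts, cap, failed, cur)      -- Python IndexError (outside Pre_)
    | some tok =>
      match PySem.Int.ofStr? tok with
      | none => (counts, cap, failed, cur)    -- Python ValueError (outside Pre_)
      | some f => (counts, cap, PySem.Set.add failed f, cur)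
  else (counts, cap, failed, cur)

-- the end-of-loop-body reset check
def resetA (powers : List Int) (n : Int)
    (st : List Int × List Int × PySem.Set Int × Int) :
    List Int × List Int × PySem.Set Int × Int :=
  let (counts, cap, failed, cur) := st
  if (PySem.List.pyRange 0 n 1).all
       (fun i => PySem.List.pyGetD cap i 0 == 0 || PySem.Set.contains failed i) then
    (counts,
     (PySem.List.pyRange 0 n 1).foldl
       (fun c i => if PySem.Set.contains failed i then c
                   else PySem.List.pySetD c i (PySem.List.pyGetD powers i 0)) cap,
     failed, cur)
  else (counts, cap, failed, cur)

def stepA (powers : List Int) (n : Int)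
    (st : List Int × List Int × PySem.Set Int × Int) (event : String) :
    List Int × List Int × PySem.Set Int × Int :=
  resetA powers n (midA powers n st event)

def solution (serversPowers : List Int) (events : List String) : Int :=
  let n := PySem.List.len serversPowers
  let st := events.foldl (stepA serversPowers n)
    (List.replicate n.toNat (0:Int), serversPowers, ([] : PySem.Set Int), (0:Int))
  let counts := st.1
  match PySem.List.max? counts (fun x => x) with
  | none => 0        -- Python: max([]) raises ValueError (outside Pre_, which needs a server)
  | some m =>
    match PySem.List.max?
        (((PySem.List.enumerate counts).filter (fun p => p.2 == m)).map (·.1)) (fun x => x) with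
    | none => 0
    | some r => r

-- ===== PORT B =====
def midB (_powers : List Int) (n : Int)
    (st : List Int × List Int × PySem.Set Int × PySem.Set Int × Int) (event : String) :
    List Int × List Int × PySem.Set Int × PySem.Set Int × Int :=
  let (counts, cap, failed, avail, cur) := st
  if PySem.Str.startswith event "REQUEST" then
    if avail = [] then (counts, cap, failed, avail, cur)      -- 'if avail:' guard
    else
      match PySem.List.min? avail (fun i => PySem.Int.mod (i - cur) n) with
      | none => (counts, cap, failed, avail, cur)             -- unreachable: avail ≠ []
      | some s =>
        let cap' := PySem.List.pySetD cap s (PySem.List.pyGetD cap s 0 - 1)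
        (PySem.List.pySetD counts s (PySem.List.pyGetD counts s 0 + 1), cap', failed,
         (if PySem.List.pyGetD cap' s 0 == 0 then PySem.Set.discard avail s else avail),
         PySem.Int.mod (s + 1) n)
  else if PySem.Str.startswith event "FAIL" then
    match PySem.List.pyGet? (PySem.Str.split₀ event) 1 with
    | none => (counts, cap, failed, avail, cur)     -- len(parts) <= 1: skipped
    | some tok =>
      match PySem.Int.ofStr? tok with
      | none => (counts, cap, failed, avail, cur)   -- except ValueError: f = None, skipped
      | some f => (counts, cap, PySem.Set.add failed f, PySem.Set.discard avail f, cur)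
  else (counts, cap, failed, avail, cur)

def resetB (powers : List Int) (n : Int)
    (st : List Int × List Int × PySem.Set Int × PySem.Set Int × Int) :
    List Int × List Int × PySem.Set Int × PySem.Set Int × Int :=
  let (counts, cap, failed, avail, cur) := st
  if avail = [] then
    let p := (PySem.List.pyRange 0 n 1).foldl
      (fun (p : List Int × PySem.Set Int) i =>
        if PySem.Set.contains failed i then p
        else
          let c := PySem.List.pySetD p.1 i (PySem.List.pyGetD powers i 0)
          (c, if PySem.List.pyGetD c i 0 == 0 then p.2 else PySem.Set.add p.2 i))
      (cap, avail)
    (counts, p.1, failed, p.2, cur)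
  else (counts, cap, failed, avail, cur)

def stepB (powers : List Int) (n : Int)
    (st : List Int × List Int × PySem.Set Int × PySem.Set Int × Int) (event : String) :
    List Int × List Int × PySem.Set Int × PySem.Set Int × Int :=
  resetB powers n (midB powers n st event)

def solution_alt (serversPowers : List Int) (events : List String) : Int :=
  let n := PySem.List.len serversPowers
  let st := events.foldl (stepB serversPowers n)
    (List.replicate n.toNat (0:Int), serversPowers, ([] : PySem.Set Int),
     PySem.Set.ofList ((PySem.List.pyRange 0 n 1).filter
       (fun i => !(PySem.List.pyGetD serversPowers i 0 == 0))), (0:Int))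
  let counts := st.1
  (PySem.List.pyRange 0 n 1).foldl
    (fun best i => if PySem.List.pyGetD counts best 0 ≤ PySem.List.pyGetD counts i 0 then i else best) 0

-- ===== PRECONDITION & SPEC =====
-- the FAIL indices named by the (parsed) FAIL events of a list
def pvFails (events : List String) : List Int :=
  events.filterMap (fun e =>
    if PySem.Str.startswith e "FAIL" = true then
      (PySem.List.pyGet? (PySem.Str.split₀ e) 1).bind PySem.Int.ofStr?
    else none)

-- Pre_ excludes exactly the inputs where A does not return: no server at all (max([]) raises
-- ValueError, and a REQUEST would raise IndexError), a FAIL event whose second token is missing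
-- (IndexError) or not an int literal (ValueError), and a REQUEST issued when every server of
-- nonzero power has already been named by a FAIL event (A's while loop then never terminates).
def Pre_solution (serversPowers : List Int) (events : List String) : Prop :=
  serversPowers ≠ [] ∧
  (∀ e ∈ events, PySem.Str.startswith e "FAIL" = true →
     (((PySem.Str.split₀ e)[1]?).bind PySem.Int.ofStr?).isSome = true) ∧
  (∀ j : Nat, j < events.length → PySem.Str.startswith (events.getD j "") "REQUEST" = true →
     ∃ i : Nat, i < serversPowers.length ∧ serversPowers.getD i 0 ≠ 0 ∧
       ((i : Int) ∉ pvFails (events.take j)))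

instance (serversPowers : List Int) (events : List String) : Decidable (Pre_solution serversPowers events) := by
  unfold Pre_solution; infer_instance

def pvWitness_solution : List Int × List String :=
  ([2, 3, 1], ["REQUEST", "REQUEST", "FAIL 1", "REQUEST", "REQUEST", "REQUEST"])

def Spec_solution (serversPowers : List Int) (events : List String) (out : Int) : Prop := out = solution_alt serversPowers events
instance (serversPowers : List Int) (events : List String) (out : Int) : Decidable (Spec_solution serversPowers events out) := by unfold Spec_solution; infer_instance

-- ===== CLAIM (what is proved, stated in full; the proofs are below) =====
def Claim_equal_solution : Prop := ∀ (serversPowers : List Int) (events : List String), Dom_solution serversPowers events → Pre_solution serversPowers events → Spec_solution serversPowers events (solution serversPowers events)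

-- ===== LEMMAS AND PROOFS =====

-- the availability predicate of server x, against capacities `cap` and failure set `failed`
def predB (cap : List Int) (failed : PySem.Set Int) (x : Int) : Bool :=
  !(PySem.Set.contains failed x) && !(PySem.List.pyGetD cap x 0 == 0)

-- the simulation invariant between A's state and B's extra components
def InvS (powers : List Int) (counts cap : List Int) (failed avail : PySem.Set Int) (cur : Int) : Prop :=
  counts.length = powers.length ∧ cap.length = powers.length ∧
  (0 ≤ cur ∧ (cur < (powers.length : Int) ∨ cur = 0)) ∧
  ∀ x : Int, x ∈ avail ↔ (0 ≤ x ∧ x < (powers.length : Int) ∧ predB cap failed x = true)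


-- modular-arithmetic helpers for the cyclic scan
theorem pv_mod_bounds (a n : Int) (hn : 0 < n) :
    0 ≤ PySem.Int.mod a n ∧ PySem.Int.mod a n < n := by
  simp only [PySem.Int.mod_eq_emod_of_pos hn]
  exact ⟨Int.emod_nonneg _ (ne_of_gt hn), Int.emod_lt_of_pos _ hn⟩

theorem pv_modSmall (a n : Int) (h0 : 0 ≤ a) (h1 : a < n) : PySem.Int.mod a n = a := by
  rw [PySem.Int.mod_eq_emod_of_pos (lt_of_le_of_lt h0 h1)]
  exact Int.emod_eq_of_lt h0 h1

theorem pv_modAdd (a b n : Int) (hn : 0 < n) :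
    PySem.Int.mod (PySem.Int.mod a n + b) n = PySem.Int.mod (a + b) n := by
  simp only [PySem.Int.mod_eq_emod_of_pos hn]
  conv_rhs => rw [Int.add_emod]
  rw [Int.add_emod (a % n) b, Int.emod_emod_of_dvd _ dvd_rfl]

-- indexed write/read on Int indices
theorem pv_getD_setD (xs : List Int) (i j v : Int) (h0 : 0 ≤ i) (h1 : i < (xs.length : Int))
    (hj : 0 ≤ j) :
    PySem.List.pyGetD (PySem.List.pySetD xs i v) j 0 = if j = i then v else PySem.List.pyGetD xs j 0 := by
  obtain ⟨iN, rfl⟩ : ∃ m : Nat, i = (m:Int) := ⟨i.toNat, (Int.toNat_of_nonneg h0).symm⟩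
  obtain ⟨jN, rfl⟩ : ∃ m : Nat, j = (m:Int) := ⟨j.toNat, (Int.toNat_of_nonneg hj).symm⟩
  have hiN : iN < xs.length := by exact_mod_cast h1
  rw [PySem.List.pySetD_natCast]
  simp only [PySem.List.pyGetD_natCast]
  by_cases hji : jN = iN
  · subst hji
    simp [List.getD_eq_getElem?_getD, hiN]
  · have hji' : ¬((jN:Int) = (iN:Int)) := by exact_mod_cast hji
    simp [List.getD_eq_getElem?_getD, Ne.symm hji, hji']

theorem pv_cond_predB (cap : List Int) (failed : PySem.Set Int) (x : Int) :
    (PySem.Set.contains failed x || (PySem.List.pyGetD cap x 0 == 0)) = (!predB cap failed x) := by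
  unfold predB
  cases PySem.Set.contains failed x <;> cases (PySem.List.pyGetD cap x 0 == 0) <;> rfl

-- the while-scan characterised: a returned server is the first available position cyclically
theorem pickA_none (cap : List Int) (failed : PySem.Set Int) (n : Int) (hn : 0 < n) :
    ∀ (fuel : Nat) (cur : Int), 0 ≤ cur → cur < n →
      pickA cap failed n fuel cur = none →
      ∀ j : Nat, j < fuel → predB cap failed (PySem.Int.mod (cur + j) n) = false := by
  intro fuel
  induction fuel with
  | zero => intro cur _ _ _ j hj; omega
  | succ fuel ih =>
    intro cur hc0 hc1 hpick j hj
    rw [pickA] at hpick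
    by_cases hcond : (PySem.Set.contains failed cur || (PySem.List.pyGetD cap cur 0 == 0)) = true
    · rw [if_pos hcond] at hpick
      have hb := pv_mod_bounds (cur+1) n hn
      match j with
      | 0 =>
        have hm : cur + ((0:Nat):Int) = cur := by push_cast; ring
        rw [hm, pv_modSmall cur n hc0 hc1]
        rw [pv_cond_predB] at hcond
        simpa using hcond
      | Nat.succ j' =>
        have := ih (PySem.Int.mod (cur+1) n) hb.1 hb.2 hpick j' (by omega)
        rw [pv_modAdd (cur+1) (j':Int) n hn] at this
        have harg : cur + ((j'+1 : Nat) : Int) = (cur + 1) + (j' : Int) := by push_cast; ring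
        rw [harg]
        exact this
    · rw [if_neg hcond] at hpick; exact absurd hpick (by simp)

theorem pickA_some (cap : List Int) (failed : PySem.Set Int) (n : Int) (hn : 0 < n) :
    ∀ (fuel : Nat) (cur : Int), 0 ≤ cur → cur < n → ∀ s,
      pickA cap failed n fuel cur = some s →
      ∃ j : Nat, j < fuel ∧ s = PySem.Int.mod (cur + j) n ∧ predB cap failed s = true ∧
        ∀ j' : Nat, j' < j → predB cap failed (PySem.Int.mod (cur + j') n) = false := by
  intro fuel
  induction fuel with
  | zero => intro cur _ _ s hpick; simp [pickA] at hpick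
  | succ fuel ih =>
    intro cur hc0 hc1 s hpick
    rw [pickA] at hpick
    by_cases hcond : (PySem.Set.contains failed cur || (PySem.List.pyGetD cap cur 0 == 0)) = true
    · rw [if_pos hcond] at hpick
      have hb := pv_mod_bounds (cur+1) n hn
      obtain ⟨j, hjf, hs, hp, hmin⟩ := ih _ hb.1 hb.2 s hpick
      rw [pv_modAdd (cur+1) (j:Int) n hn] at hs
      refine ⟨j+1, by omega, ?_, hp, ?_⟩
      · have harg : cur + ((j+1 : Nat) : Int) = (cur + 1) + (j : Int) := by push_cast; ring
        rw [harg]; exact hs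
      · intro j' hj'
        match j' with
        | 0 =>
          have hm : cur + ((0:Nat):Int) = cur := by push_cast; ring
          rw [hm, pv_modSmall cur n hc0 hc1]
          rw [pv_cond_predB] at hcond
          simpa using hcond
        | Nat.succ j'' =>
          have := hmin j'' (by omega)
          rw [pv_modAdd (cur+1) (j'':Int) n hn] at this
          have harg : cur + ((j''+1 : Nat) : Int) = (cur + 1) + (j'' : Int) := by push_cast; ring
          rw [harg]
          exact this
    · rw [if_neg hcond] at hpick
      obtain rfl : cur = s := by simpa using hpick
      refine ⟨0, by omega, ?_, ?_, by omega⟩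
      · have hm : cur + ((0:Nat):Int) = cur := by push_cast; ring
        rw [hm, pv_modSmall cur n hc0 hc1]
      · rw [pv_cond_predB] at hcond
        simpa using hcond

theorem pv_modAddRight (a b n : Int) (hn : 0 < n) :
    PySem.Int.mod (a + PySem.Int.mod b n) n = PySem.Int.mod (a + b) n := by
  rw [add_comm a, pv_modAdd b a n hn, add_comm b a]

theorem predB_true_iff (cap : List Int) (fl : PySem.Set Int) (x : Int) :
    predB cap fl x = true ↔ (¬ x ∈ fl ∧ PySem.List.pyGetD cap x 0 ≠ 0) := by
  unfold predB
  cases hc : PySem.Set.contains fl x <;> cases hz : (PySem.List.pyGetD cap x 0 == 0) <;>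
    simp_all

theorem predB_false_iff (cap : List Int) (fl : PySem.Set Int) (x : Int) :
    predB cap fl x = false ↔ (x ∈ fl ∨ PySem.List.pyGetD cap x 0 = 0) := by
  cases hb : predB cap fl x
  · have := (predB_true_iff cap fl x)
    rw [hb] at this
    simp only [Bool.false_eq_true, false_iff, not_and, not_not] at this
    simp only [true_iff]
    by_cases hm : x ∈ fl
    · exact Or.inl hm
    · exact Or.inr (by by_contra hz; exact hz (this hm))
  · have := (predB_true_iff cap fl x).mp hb
    simp only [Bool.true_eq_false, false_iff, not_or]
    exact ⟨this.1, this.2⟩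

-- the min-of-available-set pick agrees with the while-scan
theorem pick_min_eq (cap : List Int) (failed avail : PySem.Set Int) (n cur : Int)
    (hn : 0 < n) (hc0 : 0 ≤ cur) (hc1 : cur < n)
    (hav : ∀ x : Int, x ∈ avail ↔ (0 ≤ x ∧ x < n ∧ predB cap failed x = true))
    (hne : avail ≠ []) :
    ∃ s, pickA cap failed n n.toNat cur = some s ∧
      PySem.List.min? avail (fun i => PySem.Int.mod (i - cur) n) = some s := by
  obtain ⟨m, hmin⟩ : ∃ m, PySem.List.min? avail (fun i => PySem.Int.mod (i - cur) n) = some m := by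
    cases hmin : PySem.List.min? avail (fun i => PySem.Int.mod (i - cur) n) with
    | none =>
      rw [PySem.List.min?_eq_none_iff] at hmin
      exact absurd hmin hne
    | some m => exact ⟨m, rfl⟩
  have hmav := PySem.List.min?_mem hmin
  obtain ⟨hm0, hm1, hmp⟩ := (hav m).mp hmav
  have hmb := pv_mod_bounds (m - cur) n hn
  have hcurm : PySem.Int.mod (cur + PySem.Int.mod (m - cur) n) n = m := by
    rw [pv_modAddRight cur (m - cur) n hn]
    have harg : cur + (m - cur) = m := by ring
    rw [harg, pv_modSmall m n hm0 hm1]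
  set jm : Nat := (PySem.Int.mod (m - cur) n).toNat with hjm_def
  have hjm_cast : (jm : Int) = PySem.Int.mod (m - cur) n := Int.toNat_of_nonneg hmb.1
  have hjm_lt : jm < n.toNat := by omega
  cases hpick : pickA cap failed n n.toNat cur with
  | none =>
    have hf := pickA_none cap failed n hn n.toNat cur hc0 hc1 hpick jm hjm_lt
    rw [hjm_cast, hcurm] at hf
    rw [hf] at hmp
    exact absurd hmp (by simp)
  | some s =>
    obtain ⟨j, hjf, hs, hp, hminj⟩ := pickA_some cap failed n hn n.toNat cur hc0 hc1 s hpick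
    have hsb := pv_mod_bounds (cur + (j : Int)) n hn
    have hs0 : 0 ≤ s := by rw [hs]; exact hsb.1
    have hs1 : s < n := by rw [hs]; exact hsb.2
    have hsav : s ∈ avail := (hav s).mpr ⟨hs0, hs1, hp⟩
    have hkey_s : PySem.Int.mod (s - cur) n = (j : Int) := by
      rw [hs, sub_eq_add_neg, pv_modAdd (cur + (j:Int)) (-cur) n hn]
      have harg : cur + (j:Int) + -cur = (j:Int) := by ring
      rw [harg]
      exact pv_modSmall (j:Int) n (by omega) (by omega)
    have hle := PySem.List.min?_isMin hmin s hsav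
    simp only [hkey_s, ← hjm_cast] at hle
    have hnotlt : ¬ (jm < j) := by
      intro hlt
      have hf := hminj jm hlt
      rw [hjm_cast, hcurm] at hf
      rw [hf] at hmp
      exact absurd hmp (by simp)
    have hj_eq : (j : Int) = (jm : Int) := by
      have : (jm : Int) ≤ (j : Int) := by exact_mod_cast hle
      have h2 : j ≤ jm := by omega
      omega
    refine ⟨s, rfl, ?_⟩
    rw [hmin]
    congr 1
    rw [hs, hj_eq, hjm_cast, hcurm]

-- the reset loop of A: length, and the resulting cells
theorem foldRA_length (powers : List Int) (failed : PySem.Set Int) (L : List Int) (cap : List Int) :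
    (L.foldl (fun c i => if PySem.Set.contains failed i then c
        else PySem.List.pySetD c i (PySem.List.pyGetD powers i 0)) cap).length = cap.length := by
  induction L generalizing cap with
  | nil => rfl
  | cons i rest ih =>
    simp only [List.foldl_cons]
    rw [ih]
    split
    · rfl
    · exact PySem.List.length_pySetD ..

theorem foldRA_getD (powers : List Int) (failed : PySem.Set Int) (L : List Int) :
    ∀ (cap : List Int), (∀ i ∈ L, 0 ≤ i ∧ i < (cap.length : Int)) → ∀ x : Int, 0 ≤ x →
      PySem.List.pyGetD (L.foldl (fun c i => if PySem.Set.contains failed i then c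
          else PySem.List.pySetD c i (PySem.List.pyGetD powers i 0)) cap) x 0 =
        if x ∈ L ∧ PySem.Set.contains failed x = false then PySem.List.pyGetD powers x 0
        else PySem.List.pyGetD cap x 0 := by
  induction L with
  | nil => intro cap _ x hx; simp
  | cons i rest ih =>
    intro cap hL x hx
    have hi := hL i List.mem_cons_self
    have hL' : ∀ i' ∈ rest, 0 ≤ i' ∧ i' < (cap.length : Int) :=
      fun i' hi' => hL i' (List.mem_cons_of_mem _ hi')
    simp only [List.foldl_cons]
    by_cases hfi : PySem.Set.contains failed i = true
    · rw [if_pos hfi, ih cap hL' x hx]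
      by_cases hxrest : x ∈ rest ∧ PySem.Set.contains failed x = false
      · rw [if_pos hxrest, if_pos ⟨List.mem_cons_of_mem _ hxrest.1, hxrest.2⟩]
      · rw [if_neg hxrest, if_neg ?_]
        rintro ⟨hmem, hfx⟩
        rcases List.mem_cons.mp hmem with rfl | hmem'
        · rw [hfi] at hfx; exact absurd hfx (by simp)
        · exact hxrest ⟨hmem', hfx⟩
    · rw [if_neg hfi]
      have hlen : (PySem.List.pySetD cap i (PySem.List.pyGetD powers i 0)).length = cap.length :=
        PySem.List.length_pySetD ..
      rw [ih _ (by rw [hlen]; exact hL') x hx]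
      rw [pv_getD_setD cap i x _ hi.1 hi.2 hx]
      by_cases hxrest : x ∈ rest ∧ PySem.Set.contains failed x = false
      · rw [if_pos hxrest, if_pos ⟨List.mem_cons_of_mem _ hxrest.1, hxrest.2⟩]
      · rw [if_neg hxrest]
        by_cases hxi : x = i
        · subst hxi
          rw [if_pos rfl, if_pos ⟨List.mem_cons_self, by simp at hfi ⊢; exact hfi⟩]
        · rw [if_neg hxi, if_neg ?_]
          rintro ⟨hmem, hfx⟩
          rcases List.mem_cons.mp hmem with rfl | hmem'
          · exact hxi rfl
          · exact hxrest ⟨hmem', hfx⟩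

-- the reset loop of B: same capacities, and the rebuilt availability set
theorem foldRB_fst (powers : List Int) (failed : PySem.Set Int) (L : List Int) :
    ∀ (cap : List Int) (av : PySem.Set Int),
      (L.foldl (fun (p : List Int × PySem.Set Int) i =>
          if PySem.Set.contains failed i then p
          else
            let c := PySem.List.pySetD p.1 i (PySem.List.pyGetD powers i 0)
            (c, if PySem.List.pyGetD c i 0 == 0 then p.2 else PySem.Set.add p.2 i))
        (cap, av)).1 =
      L.foldl (fun c i => if PySem.Set.contains failed i then c
          else PySem.List.pySetD c i (PySem.List.pyGetD powers i 0)) cap := by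
  induction L with
  | nil => intro cap av; rfl
  | cons i rest ih =>
    intro cap av
    simp only [List.foldl_cons]
    by_cases hfi : PySem.Set.contains failed i = true
    · rw [if_pos hfi, if_pos hfi]; exact ih cap av
    · rw [if_neg hfi, if_neg hfi]; exact ih _ _

theorem foldRB_mem (powers : List Int) (failed : PySem.Set Int) (L : List Int) :
    ∀ (cap : List Int) (av : PySem.Set Int), (∀ i ∈ L, 0 ≤ i ∧ i < (cap.length : Int)) →
      ∀ x : Int, (x ∈ (L.foldl (fun (p : List Int × PySem.Set Int) i =>
          if PySem.Set.contains failed i then p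
          else
            let c := PySem.List.pySetD p.1 i (PySem.List.pyGetD powers i 0)
            (c, if PySem.List.pyGetD c i 0 == 0 then p.2 else PySem.Set.add p.2 i))
        (cap, av)).2 ↔
        (x ∈ av ∨ (x ∈ L ∧ PySem.Set.contains failed x = false ∧ PySem.List.pyGetD powers x 0 ≠ 0))) := by
  induction L with
  | nil => intro cap av _ x; simp
  | cons i rest ih =>
    intro cap av hL x
    have hi := hL i List.mem_cons_self
    have hL' : ∀ i' ∈ rest, 0 ≤ i' ∧ i' < (cap.length : Int) :=
      fun i' hi' => hL i' (List.mem_cons_of_mem _ hi')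
    simp only [List.foldl_cons]
    by_cases hfi : PySem.Set.contains failed i = true
    · rw [if_pos hfi]
      rw [ih cap av hL' x]
      constructor
      · rintro (hav | ⟨hmem, hfx, hpw⟩)
        · exact Or.inl hav
        · exact Or.inr ⟨List.mem_cons_of_mem _ hmem, hfx, hpw⟩
      · rintro (hav | ⟨hmem, hfx, hpw⟩)
        · exact Or.inl hav
        · rcases List.mem_cons.mp hmem with rfl | hmem'
          · rw [hfi] at hfx; exact absurd hfx (by simp)
          · exact Or.inr ⟨hmem', hfx, hpw⟩
    · rw [if_neg hfi]
      have hlen : (PySem.List.pySetD cap i (PySem.List.pyGetD powers i 0)).length = cap.length :=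
        PySem.List.length_pySetD ..
      have hgi : PySem.List.pyGetD (PySem.List.pySetD cap i (PySem.List.pyGetD powers i 0)) i 0 =
          PySem.List.pyGetD powers i 0 := by
        rw [pv_getD_setD cap i i _ hi.1 hi.2 hi.1, if_pos rfl]
      rw [ih _ _ (by rw [hlen]; exact hL') x]
      have hfi' : PySem.Set.contains failed i = false := by
        simpa using hfi
      by_cases hz : (PySem.List.pyGetD powers i 0 == 0) = true
      · have hz' : PySem.List.pyGetD powers i 0 = 0 := by simpa using hz
        rw [if_pos (by rw [hgi]; exact hz)]
        constructor
        · rintro (hav | ⟨hmem, hfx, hpw⟩)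
          · exact Or.inl hav
          · exact Or.inr ⟨List.mem_cons_of_mem _ hmem, hfx, hpw⟩
        · rintro (hav | ⟨hmem, hfx, hpw⟩)
          · exact Or.inl hav
          · rcases List.mem_cons.mp hmem with rfl | hmem'
            · exact absurd hz' hpw
            · exact Or.inr ⟨hmem', hfx, hpw⟩
      · have hz' : PySem.List.pyGetD powers i 0 ≠ 0 := by simpa using hz
        rw [if_neg (by rw [hgi]; exact hz)]
        rw [PySem.Set.mem_add]
        constructor
        · rintro ((hav | rfl) | ⟨hmem, hfx, hpw⟩)
          · exact Or.inl hav
          · exact Or.inr ⟨List.mem_cons_self, hfi', hz'⟩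
          · exact Or.inr ⟨List.mem_cons_of_mem _ hmem, hfx, hpw⟩
        · rintro (hav | ⟨hmem, hfx, hpw⟩)
          · exact Or.inl (Or.inl hav)
          · rcases List.mem_cons.mp hmem with rfl | hmem'
            · exact Or.inl (Or.inr rfl)
            · exact Or.inr ⟨hmem', hfx, hpw⟩

-- one loop body preserves the simulation
theorem mid_equiv (powers : List Int) (e : String) (counts cap : List Int)
    (failed avail : PySem.Set Int) (cur : Int)
    (h : InvS powers counts cap failed avail cur) :
    ∃ avail', midB powers (powers.length : Int) (counts, cap, failed, avail, cur) e =
        ((midA powers (powers.length : Int) (counts, cap, failed, cur) e).1,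
         (midA powers (powers.length : Int) (counts, cap, failed, cur) e).2.1,
         (midA powers (powers.length : Int) (counts, cap, failed, cur) e).2.2.1, avail',
         (midA powers (powers.length : Int) (counts, cap, failed, cur) e).2.2.2) ∧
      InvS powers (midA powers (powers.length : Int) (counts, cap, failed, cur) e).1
        (midA powers (powers.length : Int) (counts, cap, failed, cur) e).2.1
        (midA powers (powers.length : Int) (counts, cap, failed, cur) e).2.2.1 avail'
        (midA powers (powers.length : Int) (counts, cap, failed, cur) e).2.2.2 := by
  obtain ⟨hclen, hplen, ⟨hcur0, hcur1⟩, hav⟩ := h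
  set n : Int := (powers.length : Int) with hn_def
  by_cases hreq : PySem.Str.startswith e "REQUEST" = true
  · by_cases hempty : avail = []
    · have hpick : pickA cap failed n n.toNat cur = none := by
        cases hp : pickA cap failed n n.toNat cur with
        | none => rfl
        | some s =>
          exfalso
          rcases Nat.eq_zero_or_pos powers.length with h0 | h0
          · rw [hn_def, h0] at hp
            simp [pickA] at hp
          · have hn : (0:Int) < n := by rw [hn_def]; exact_mod_cast h0
            have hc1 : cur < n := by
              rcases hcur1 with h | h
              · exact h
              · omega
            obtain ⟨j, _, hs, hpred, _⟩ := pickA_some cap failed n hn n.toNat cur hcur0 hc1 s hp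
            have hb := pv_mod_bounds (cur + (j:Int)) n hn
            have hmem : s ∈ avail := (hav s).mpr ⟨by rw [hs]; exact hb.1, by rw [hs]; exact hb.2, hpred⟩
            rw [hempty] at hmem
            simp at hmem
      refine ⟨avail, ?_, ?_⟩
      · simp only [midB, midA, hreq, hpick, if_true, if_pos hempty]
      · simp only [midA, hreq, hpick, if_true]
        exact ⟨hclen, hplen, ⟨hcur0, hcur1⟩, hav⟩
    · obtain ⟨x0, hx0⟩ := List.exists_mem_of_ne_nil avail hempty
      obtain ⟨hx00, hx01, _⟩ := (hav x0).mp hx0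
      have hn : (0:Int) < n := by omega
      have hc1 : cur < n := by
        rcases hcur1 with h | h
        · exact h
        · omega
      obtain ⟨s, hpick, hmin⟩ := pick_min_eq cap failed avail n cur hn hcur0 hc1 hav hempty
      obtain ⟨j, _, hs, hpred, _⟩ := pickA_some cap failed n hn n.toNat cur hcur0 hc1 s hpick
      have hb := pv_mod_bounds (cur + (j:Int)) n hn
      have hs0 : 0 ≤ s := by rw [hs]; exact hb.1
      have hs1 : s < n := by rw [hs]; exact hb.2
      have hs1' : s < (cap.length : Int) := by rw [hplen]; exact hs1
      refine ⟨(if PySem.List.pyGetD (PySem.List.pySetD cap s (PySem.List.pyGetD cap s 0 - 1)) s 0 == 0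
               then PySem.Set.discard avail s else avail), ?_, ?_⟩
      · simp only [midB, midA, hreq, hpick, hmin, if_true]
        rw [if_neg hempty]
      · simp only [midA, hreq, hpick, if_true]
        refine ⟨?_, ?_, ?_, ?_⟩
        · rw [PySem.List.length_pySetD]
          exact hclen
        · rw [PySem.List.length_pySetD]
          exact hplen
        · exact ⟨(pv_mod_bounds (s+1) n hn).1, Or.inl (pv_mod_bounds (s+1) n hn).2⟩
        · intro x
          constructor
          · intro hxin
            have hxav : x ∈ avail := by
              by_cases hz : (PySem.List.pyGetD (PySem.List.pySetD cap s (PySem.List.pyGetD cap s 0 - 1)) s 0 == 0) = true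
              · rw [if_pos hz, PySem.Set.mem_discard] at hxin
                exact hxin.1
              · rw [if_neg hz] at hxin
                exact hxin
            obtain ⟨hx0', hx1', hxp⟩ := (hav x).mp hxav
            refine ⟨hx0', hx1', ?_⟩
            rw [predB_true_iff] at hxp ⊢
            obtain ⟨hxf, hxz⟩ := hxp
            refine ⟨hxf, ?_⟩
            rw [pv_getD_setD cap s x _ hs0 hs1' hx0']
            by_cases hxs : x = s
            · subst hxs
              rw [if_pos rfl]
              by_cases hz : (PySem.List.pyGetD (PySem.List.pySetD cap x (PySem.List.pyGetD cap x 0 - 1)) x 0 == 0) = true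
              · rw [if_pos hz, PySem.Set.mem_discard] at hxin
                exact absurd rfl hxin.2
              · intro hc
                apply hz
                rw [pv_getD_setD cap x x _ hs0 hs1' hs0, if_pos rfl]
                simpa using hc
            · rw [if_neg hxs]
              exact hxz
          · rintro ⟨hx0', hx1', hxp⟩
            rw [predB_true_iff] at hxp
            obtain ⟨hxf, hxz⟩ := hxp
            rw [pv_getD_setD cap s x _ hs0 hs1' hx0'] at hxz
            by_cases hxs : x = s
            · subst hxs
              rw [if_pos rfl] at hxz
              have hznew : (PySem.List.pyGetD (PySem.List.pySetD cap x (PySem.List.pyGetD cap x 0 - 1)) x 0 == 0) = false := by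
                rw [pv_getD_setD cap x x _ hs0 hs1' hs0, if_pos rfl]
                simpa using hxz
              rw [hznew]
              simp only [Bool.false_eq_true, if_false]
              exact (hav x).mpr ⟨hs0, hs1, hpred⟩
            · rw [if_neg hxs] at hxz
              have hxav : x ∈ avail := (hav x).mpr ⟨hx0', hx1', (predB_true_iff _ _ _).mpr ⟨hxf, hxz⟩⟩
              by_cases hz : (PySem.List.pyGetD (PySem.List.pySetD cap s (PySem.List.pyGetD cap s 0 - 1)) s 0 == 0) = true
              · rw [if_pos hz, PySem.Set.mem_discard]
                exact ⟨hxav, hxs⟩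
              · rw [if_neg hz]
                exact hxav
  · rw [Bool.not_eq_true] at hreq
    by_cases hfl : PySem.Str.startswith e "FAIL" = true
    · cases hpg : PySem.List.pyGet? (PySem.Str.split₀ e) 1 with
      | none =>
        refine ⟨avail, ?_, ?_⟩
        · simp only [midB, midA, hreq, hfl, hpg, if_true, Bool.false_eq_true, if_false]
        · simp only [midA, hreq, hfl, hpg, if_true, Bool.false_eq_true, if_false]
          exact ⟨hclen, hplen, ⟨hcur0, hcur1⟩, hav⟩
      | some tok =>
        cases hof : PySem.Int.ofStr? tok with
        | none =>
          refine ⟨avail, ?_, ?_⟩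
          · simp only [midB, midA, hreq, hfl, hpg, hof, if_true, Bool.false_eq_true, if_false]
          · simp only [midA, hreq, hfl, hpg, hof, if_true, Bool.false_eq_true, if_false]
            exact ⟨hclen, hplen, ⟨hcur0, hcur1⟩, hav⟩
        | some f =>
          refine ⟨PySem.Set.discard avail f, ?_, ?_⟩
          · simp only [midB, midA, hreq, hfl, hpg, hof, if_true, Bool.false_eq_true, if_false]
          · simp only [midA, hreq, hfl, hpg, hof, if_true, Bool.false_eq_true, if_false]
            refine ⟨hclen, hplen, ⟨hcur0, hcur1⟩, ?_⟩
            intro x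
            rw [PySem.Set.mem_discard]
            constructor
            · rintro ⟨hxav, hxf⟩
              obtain ⟨hx0', hx1', hxp⟩ := (hav x).mp hxav
              refine ⟨hx0', hx1', ?_⟩
              rw [predB_true_iff] at hxp ⊢
              refine ⟨?_, hxp.2⟩
              rw [PySem.Set.mem_add]
              rintro (hmem | heq)
              · exact hxp.1 hmem
              · exact hxf heq
            · rintro ⟨hx0', hx1', hxp⟩
              rw [predB_true_iff, PySem.Set.mem_add] at hxp
              exact ⟨(hav x).mpr ⟨hx0', hx1',
                  (predB_true_iff _ _ _).mpr ⟨fun hmem => hxp.1 (Or.inl hmem), hxp.2⟩⟩,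
                fun heq => hxp.1 (Or.inr heq)⟩
    · rw [Bool.not_eq_true] at hfl
      refine ⟨avail, ?_, ?_⟩
      · simp only [midB, midA, hreq, hfl, Bool.false_eq_true, if_false]
      · simp only [midA, hreq, hfl, Bool.false_eq_true, if_false]
        exact ⟨hclen, hplen, ⟨hcur0, hcur1⟩, hav⟩


theorem pv_contains_iff (s : PySem.Set Int) (x : Int) : PySem.Set.contains s x = true ↔ x ∈ s := by
  simp

theorem pv_contains_false_iff (s : PySem.Set Int) (x : Int) :
    PySem.Set.contains s x = false ↔ x ∉ s := by
  rw [← Bool.not_eq_true, pv_contains_iff]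

theorem reset_equiv (powers : List Int) (counts cap : List Int)
    (failed avail : PySem.Set Int) (cur : Int)
    (h : InvS powers counts cap failed avail cur) :
    ∃ avail', resetB powers (powers.length : Int) (counts, cap, failed, avail, cur) =
        ((resetA powers (powers.length : Int) (counts, cap, failed, cur)).1,
         (resetA powers (powers.length : Int) (counts, cap, failed, cur)).2.1,
         (resetA powers (powers.length : Int) (counts, cap, failed, cur)).2.2.1, avail',
         (resetA powers (powers.length : Int) (counts, cap, failed, cur)).2.2.2) ∧
      InvS powers (resetA powers (powers.length : Int) (counts, cap, failed, cur)).1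
        (resetA powers (powers.length : Int) (counts, cap, failed, cur)).2.1
        (resetA powers (powers.length : Int) (counts, cap, failed, cur)).2.2.1 avail'
        (resetA powers (powers.length : Int) (counts, cap, failed, cur)).2.2.2 := by
  obtain ⟨hclen, hplen, hcur, hav⟩ := h
  set n : Int := (powers.length : Int) with hn_def
  have hrange : ∀ i ∈ PySem.List.pyRange 0 n 1, 0 ≤ i ∧ i < (cap.length : Int) := by
    intro i hi
    rw [PySem.List.mem_pyRange_one] at hi
    exact ⟨hi.1, by rw [hplen]; exact hi.2⟩
  have hall_iff : ((PySem.List.pyRange 0 n 1).all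
      (fun i => PySem.List.pyGetD cap i 0 == 0 || PySem.Set.contains failed i) = true) ↔ avail = [] := by
    rw [List.all_eq_true]
    constructor
    · intro hA
      rw [List.eq_nil_iff_forall_not_mem]
      intro x hx
      obtain ⟨hx0, hx1, hxp⟩ := (hav x).mp hx
      have hmem : x ∈ PySem.List.pyRange 0 n 1 := by
        rw [PySem.List.mem_pyRange_one]; exact ⟨hx0, hx1⟩
      have htest := hA x hmem
      rw [predB_true_iff] at hxp
      cases hz : (PySem.List.pyGetD cap x 0 == 0) with
      | true => exact hxp.2 (by simpa using hz)
      | false =>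
        rw [hz, Bool.false_or] at htest
        exact hxp.1 ((pv_contains_iff failed x).mp htest)
    · intro hnil x hmem
      rw [PySem.List.mem_pyRange_one] at hmem
      have hpf : predB cap failed x = false := by
        cases hb : predB cap failed x
        · rfl
        · exact absurd ((hav x).mpr ⟨hmem.1, hmem.2, hb⟩) (by rw [hnil]; simp)
      rw [predB_false_iff] at hpf
      rcases hpf with hmemf | hz
      · rw [(pv_contains_iff failed x).mpr hmemf, Bool.or_true]
      · rw [(by simpa using hz : (PySem.List.pyGetD cap x 0 == 0) = true), Bool.true_or]
  by_cases hA : ((PySem.List.pyRange 0 n 1).all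
      (fun i => PySem.List.pyGetD cap i 0 == 0 || PySem.Set.contains failed i)) = true
  · have hnil : avail = [] := hall_iff.mp hA
    subst hnil
    refine ⟨((PySem.List.pyRange 0 n 1).foldl
      (fun (p : List Int × PySem.Set Int) i =>
        if PySem.Set.contains failed i then p
        else
          let c := PySem.List.pySetD p.1 i (PySem.List.pyGetD powers i 0)
          (c, if PySem.List.pyGetD c i 0 == 0 then p.2 else PySem.Set.add p.2 i))
      (cap, ([] : PySem.Set Int))).2, ?_, ?_⟩
    · simp only [resetB, resetA, hA, if_true]
      rw [foldRB_fst]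
    · simp only [resetA, hA, if_true]
      refine ⟨hclen, ?_, hcur, ?_⟩
      · rw [foldRA_length]
        exact hplen
      · intro x
        rw [foldRB_mem powers failed _ cap [] hrange x]
        constructor
        · rintro (hfalse | ⟨hmem, hfx, hpw⟩)
          · simp at hfalse
          · have hmem' := hmem
            rw [PySem.List.mem_pyRange_one] at hmem'
            refine ⟨hmem'.1, hmem'.2, ?_⟩
            rw [predB_true_iff]
            refine ⟨(pv_contains_false_iff failed x).mp hfx, ?_⟩
            rw [foldRA_getD powers failed _ cap hrange x hmem'.1, if_pos ⟨hmem, hfx⟩]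
            exact hpw
        · rintro ⟨hx0, hx1, hxp⟩
          rw [predB_true_iff] at hxp
          have hmem : x ∈ PySem.List.pyRange 0 n 1 := by
            rw [PySem.List.mem_pyRange_one]; exact ⟨hx0, hx1⟩
          have hfx : PySem.Set.contains failed x = false :=
            (pv_contains_false_iff failed x).mpr hxp.1
          refine Or.inr ⟨hmem, hfx, ?_⟩
          have hz := hxp.2
          rw [foldRA_getD powers failed _ cap hrange x hx0, if_pos ⟨hmem, hfx⟩] at hz
          exact hz
  · have hne : avail ≠ [] := fun hnil => hA (hall_iff.mpr hnil)
    refine ⟨avail, ?_, ?_⟩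
    · simp only [resetB, resetA]
      rw [if_neg hne, if_neg hA]
    · simp only [resetA]
      rw [if_neg hA]
      exact ⟨hclen, hplen, hcur, hav⟩

theorem fold_equiv (powers : List Int) (events : List String) :
    ∀ (counts cap : List Int) (failed avail : PySem.Set Int) (cur : Int),
      InvS powers counts cap failed avail cur →
      ∃ avail', events.foldl (stepB powers (powers.length : Int)) (counts, cap, failed, avail, cur) =
          ((events.foldl (stepA powers (powers.length : Int)) (counts, cap, failed, cur)).1,
           (events.foldl (stepA powers (powers.length : Int)) (counts, cap, failed, cur)).2.1,
           (events.foldl (stepA powers (powers.length : Int)) (counts, cap, failed, cur)).2.2.1, avail',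
           (events.foldl (stepA powers (powers.length : Int)) (counts, cap, failed, cur)).2.2.2) ∧
        InvS powers (events.foldl (stepA powers (powers.length : Int)) (counts, cap, failed, cur)).1
          (events.foldl (stepA powers (powers.length : Int)) (counts, cap, failed, cur)).2.1
          (events.foldl (stepA powers (powers.length : Int)) (counts, cap, failed, cur)).2.2.1 avail'
          (events.foldl (stepA powers (powers.length : Int)) (counts, cap, failed, cur)).2.2.2 := by
  induction events with
  | nil =>
    intro counts cap failed avail cur h
    exact ⟨avail, rfl, h⟩
  | cons e rest ih =>
    intro counts cap failed avail cur h
    obtain ⟨av1, heq1, h1⟩ := mid_equiv powers e counts cap failed avail cur h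
    obtain ⟨av2, heq2, h2⟩ := reset_equiv powers
      (midA powers (powers.length : Int) (counts, cap, failed, cur) e).1
      (midA powers (powers.length : Int) (counts, cap, failed, cur) e).2.1
      (midA powers (powers.length : Int) (counts, cap, failed, cur) e).2.2.1 av1
      (midA powers (powers.length : Int) (counts, cap, failed, cur) e).2.2.2 h1
    have hstep : stepB powers (powers.length : Int) (counts, cap, failed, avail, cur) e =
        ((stepA powers (powers.length : Int) (counts, cap, failed, cur) e).1,
         (stepA powers (powers.length : Int) (counts, cap, failed, cur) e).2.1,
         (stepA powers (powers.length : Int) (counts, cap, failed, cur) e).2.2.1, av2,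
         (stepA powers (powers.length : Int) (counts, cap, failed, cur) e).2.2.2) := by
      unfold stepB stepA
      rw [heq1]
      exact heq2
    obtain ⟨av3, heq3, h3⟩ := ih
      (stepA powers (powers.length : Int) (counts, cap, failed, cur) e).1
      (stepA powers (powers.length : Int) (counts, cap, failed, cur) e).2.1
      (stepA powers (powers.length : Int) (counts, cap, failed, cur) e).2.2.1 av2
      (stepA powers (powers.length : Int) (counts, cap, failed, cur) e).2.2.2 h2
    refine ⟨av3, ?_, h3⟩
    simp only [List.foldl_cons]
    rw [hstep]
    exact heq3

-- B's final argmax loop returns the greatest index attaining the maximum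
theorem bfold_spec (counts : List Int) :
    ∀ k : Nat, 1 ≤ k →
      ∃ g : Nat, (PySem.List.pyRange 0 (k : Int) 1).foldl
          (fun best i => if PySem.List.pyGetD counts best 0 ≤ PySem.List.pyGetD counts i 0 then i else best) 0 = (g : Int) ∧
        g < k ∧ (∀ j : Nat, j < k → counts.getD j 0 ≤ counts.getD g 0) ∧
        (∀ j : Nat, j < k → counts.getD j 0 = counts.getD g 0 → j ≤ g) := by
  intro k hk
  induction k with
  | zero => omega
  | succ k ihk =>
    rcases Nat.eq_zero_or_pos k with rfl | hk1
    · refine ⟨0, ?_, by omega, ?_, ?_⟩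
      · have h1 : ((0+1 : Nat) : Int) = 0 + 1 := by norm_num
        rw [h1, PySem.List.pyRange_one_singleton]
        simp
      · intro j hj
        interval_cases j
        exact le_refl _
      · intro j hj _
        omega
    · obtain ⟨g, hg, hglt, hmax, huniq⟩ := ihk hk1
      have hsplit : PySem.List.pyRange 0 ((k+1 : Nat) : Int) 1 =
          PySem.List.pyRange 0 ((k : Nat) : Int) 1 ++ [((k : Nat) : Int)] := by
        have h1 : ((k+1 : Nat) : Int) = ((k : Nat) : Int) + 1 := by push_cast; ring
        rw [h1]
        exact PySem.List.pyRange_one_succ_right (by exact_mod_cast Nat.zero_le k)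
      rw [hsplit, List.foldl_append, hg]
      simp only [List.foldl_cons, List.foldl_nil, PySem.List.pyGetD_natCast]
      by_cases hle : counts.getD g 0 ≤ counts.getD k 0
      · rw [if_pos hle]
        refine ⟨k, rfl, by omega, ?_, ?_⟩
        · intro j hj
          rcases (by omega : j < k ∨ j = k) with h | rfl
          · exact le_trans (hmax j h) hle
          · exact le_refl _
        · intro j hj _
          omega
      · rw [if_neg hle]
        refine ⟨g, rfl, by omega, ?_, ?_⟩
        · intro j hj
          rcases (by omega : j < k ∨ j = k) with h | rfl
          · exact hmax j h
          · omega
        · intro j hj heq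
          rcases (by omega : j < k ∨ j = k) with h | rfl
          · exact huniq j h heq
          · omega

-- the two final extractions agree
theorem final_eq (counts : List Int) :
    (match PySem.List.max? counts (fun x => x) with
     | none => 0
     | some m =>
       match PySem.List.max?
           (((PySem.List.enumerate counts).filter (fun p => p.2 == m)).map (fun p => p.1)) (fun x => x) with
       | none => 0
       | some r => r) =
    (PySem.List.pyRange 0 (counts.length : Int) 1).foldl
      (fun best i => if PySem.List.pyGetD counts best 0 ≤ PySem.List.pyGetD counts i 0 then i else best) 0 := by
  by_cases hnil : counts = []
  · subst hnil
    decide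
  · have hk : 1 ≤ counts.length := List.length_pos_iff.mpr hnil
    obtain ⟨g, hg, hglt, hmax, huniq⟩ := bfold_spec counts counts.length hk
    cases hm : PySem.List.max? counts (fun x => x) with
    | none =>
      rw [PySem.List.max?_eq_none_iff] at hm
      exact absurd hm hnil
    | some m =>
      have hmmem := PySem.List.max?_mem hm
      have hmmax := PySem.List.max?_isMax hm
      have hgm : counts.getD g 0 = m := by
        have h1 : counts.getD g 0 ≤ m := by
          have := hmmax (counts[g]) (List.getElem_mem hglt)
          rw [List.getD_eq_getElem counts 0 hglt]
          exact this
        obtain ⟨km, hkm, hkm_eq⟩ := List.mem_iff_getElem.mp hmmem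
        have h2 : m ≤ counts.getD g 0 := by
          have := hmax km hkm
          rw [List.getD_eq_getElem counts 0 hkm, hkm_eq] at this
          exact this
        omega
      cases hr : PySem.List.max?
          (((PySem.List.enumerate counts).filter (fun p => p.2 == m)).map (fun p => p.1))
          (fun x => x) with
      | none =>
        rw [PySem.List.max?_eq_none_iff] at hr
        have hgxs : ((g:Int)) ∈ (((PySem.List.enumerate counts).filter (fun p => p.2 == m)).map
            (fun p => (p : Int × Int).1)) := by
          apply List.mem_map.mpr
          refine ⟨((g:Int), m), ?_, rfl⟩
          apply List.mem_filter.mpr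
          refine ⟨?_, by simp⟩
          apply (PySem.List.mem_enumerate_iff _ _ _).mpr
          refine ⟨g, hglt, ?_⟩
          rw [zero_add, ← hgm, List.getD_eq_getElem counts 0 hglt]
        rw [hr] at hgxs
        simp at hgxs
      | some r =>
        dsimp only
        rw [hr]
        dsimp only
        have hrmem := PySem.List.max?_mem hr
        have hrmax := PySem.List.max?_isMax hr
        have hgxs : ((g:Int)) ∈ (((PySem.List.enumerate counts).filter (fun p => p.2 == m)).map
            (fun p => (p : Int × Int).1)) := by
          apply List.mem_map.mpr
          refine ⟨((g:Int), m), ?_, rfl⟩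
          apply List.mem_filter.mpr
          refine ⟨?_, by simp⟩
          apply (PySem.List.mem_enumerate_iff _ _ _).mpr
          refine ⟨g, hglt, ?_⟩
          rw [zero_add, ← hgm, List.getD_eq_getElem counts 0 hglt]
        obtain ⟨p, hp, hp1⟩ := List.mem_map.mp hrmem
        obtain ⟨hpenum, hpm⟩ := List.mem_filter.mp hp
        obtain ⟨kr, hkr, hpeq⟩ := (PySem.List.mem_enumerate_iff _ _ _).mp hpenum
        have hr_eq : r = (kr : Int) := by rw [← hp1, hpeq]; simp
        have hckr : counts[kr] = m := by
          rw [hpeq] at hpm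
          simpa using hpm
        have hgle : (g : Int) ≤ r := hrmax _ hgxs
        have hkr_le : kr ≤ g := by
          apply huniq kr hkr
          rw [List.getD_eq_getElem counts 0 hkr, hckr, hgm]
        have hrg : r = (g : Int) := by omega
        rw [hrg, hg]

-- ===== VERDICT (by name: the statement is the Claim_ definition above) =====
theorem solution_spec : Claim_equal_solution := by
  intro powers events _ _
  unfold Spec_solution solution solution_alt
  simp only [PySem.List.len_eq, Int.toNat_natCast]
  have hinit : InvS powers (List.replicate powers.length (0:Int)) powers []
      (PySem.Set.ofList ((PySem.List.pyRange 0 (powers.length : Int) 1).filter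
        (fun i => !(PySem.List.pyGetD powers i 0 == 0)))) 0 := by
    refine ⟨List.length_replicate, rfl, ⟨le_refl 0, Or.inr rfl⟩, ?_⟩
    intro x
    rw [PySem.Set.mem_ofList, List.mem_filter, PySem.List.mem_pyRange_one]
    constructor
    · rintro ⟨⟨hx0, hx1⟩, hz⟩
      refine ⟨hx0, hx1, ?_⟩
      rw [predB_true_iff]
      exact ⟨by simp, by simpa using hz⟩
    · rintro ⟨hx0, hx1, hp⟩
      rw [predB_true_iff] at hp
      exact ⟨⟨hx0, hx1⟩, by simpa using hp.2⟩
  obtain ⟨avail', heq, hI⟩ := fold_equiv powers events (List.replicate powers.length (0:Int))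
    powers []
    (PySem.Set.ofList ((PySem.List.pyRange 0 (powers.length : Int) 1).filter
      (fun i => !(PySem.List.pyGetD powers i 0 == 0)))) 0 hinit
  show (match PySem.List.max? ((events.foldl (stepA powers ((powers.length : Int)))
        (List.replicate powers.length (0:Int), powers, ([] : PySem.Set Int), (0:Int))).1)
        (fun x => x) with
    | none => 0
    | some m =>
      match PySem.List.max?
          (((PySem.List.enumerate ((events.foldl (stepA powers ((powers.length : Int)))
              (List.replicate powers.length (0:Int), powers, ([] : PySem.Set Int), (0:Int))).1)).filter
            (fun p => p.2 == m)).map (fun p => p.1)) (fun x => x) with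
      | none => 0
      | some r => r) =
    (PySem.List.pyRange 0 ((powers.length : Int)) 1).foldl
      (fun best i =>
        if PySem.List.pyGetD ((events.foldl (stepB powers ((powers.length : Int)))
            (List.replicate powers.length (0:Int), powers, ([] : PySem.Set Int),
             PySem.Set.ofList ((PySem.List.pyRange 0 ((powers.length : Int)) 1).filter
               (fun i => !(PySem.List.pyGetD powers i 0 == 0))), (0:Int))).1) best 0 ≤
           PySem.List.pyGetD ((events.foldl (stepB powers ((powers.length : Int)))
            (List.replicate powers.length (0:Int), powers, ([] : PySem.Set Int),
             PySem.Set.ofList ((PySem.List.pyRange 0 ((powers.length : Int)) 1).filter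
               (fun i => !(PySem.List.pyGetD powers i 0 == 0))), (0:Int))).1) i 0
        then i else best) 0
  set C := (events.foldl (stepA powers ((powers.length : Int)))
      (List.replicate powers.length (0:Int), powers, ([] : PySem.Set Int), (0:Int))).1 with hC
  have hBC : (events.foldl (stepB powers ((powers.length : Int)))
      (List.replicate powers.length (0:Int), powers, ([] : PySem.Set Int),
       PySem.Set.ofList ((PySem.List.pyRange 0 ((powers.length : Int)) 1).filter
         (fun i => !(PySem.List.pyGetD powers i 0 == 0))), (0:Int))).1 = C := by
    rw [heq]
  simp only [hBC]
  rw [show ((powers.length : Int)) = ((C.length : Int)) from by rw [hI.1]]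
  exact final_eq C
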